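-- pv_equiv track=rewrite | github.com/frank26080115/Junk-Warehouse | backend/app/trim_img_border.py | _background_from_corners
-- ===== SOURCE A (Python) =====
-- from typing import Tuple, Optional, List
--
-- def _colors_similar(c1: Tuple[int, int, int], c2: Tuple[int, int, int], thr: int) -> bool:
--     return (abs(c1[0] - c2[0]) <= thr and
--             abs(c1[1] - c2[1]) <= thr and
--             abs(c1[2] - c2[2]) <= thr)
--
-- def _background_from_corners(corners: List[Tuple[int, int, int]], thr: int) -> Optional[Tuple[int, int, int]]:
--     """
--     Returns a background color if all corners agree within threshold; otherwise None.
--     We simply require all corners to be similar to the first.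
--     """
--     if not corners:
--         return None
--     ref = corners[0]
--     for c in corners[1:]:
--         if not _colors_similar(ref, c, thr):
--             return None
--     return ref  # use the first; all are within threshold
-- ===== SOURCE B (Python) =====
-- from typing import Tuple, Optional, List
--
-- def _background_from_corners(corners: List[Tuple[int, int, int]], thr: int) -> Optional[Tuple[int, int, int]]:
--     if not corners:
--         return None
--     ref = corners[0]
--     rest = corners[1:]
--     if not rest:
--         return ref
--     mins = [min(col) for col in zip(*rest)]
--     maxs = [max(col) for col in zip(*rest)]
--     if all(mx - r <= thr and r - mn <= thr for r, mn, mx in zip(ref, mins, maxs)):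
--         return ref
--     return None
-- ===== Notes on version B (the rewrite author's own statement) =====
-- stated objective: alternative
-- what changed: B replaces the per-corner short-circuiting similarity loop by one aggregate pass that builds per-channel minima and maxima of the remaining corners and then makes a single constant-size comparison against the first corner.
import Mathlib
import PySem

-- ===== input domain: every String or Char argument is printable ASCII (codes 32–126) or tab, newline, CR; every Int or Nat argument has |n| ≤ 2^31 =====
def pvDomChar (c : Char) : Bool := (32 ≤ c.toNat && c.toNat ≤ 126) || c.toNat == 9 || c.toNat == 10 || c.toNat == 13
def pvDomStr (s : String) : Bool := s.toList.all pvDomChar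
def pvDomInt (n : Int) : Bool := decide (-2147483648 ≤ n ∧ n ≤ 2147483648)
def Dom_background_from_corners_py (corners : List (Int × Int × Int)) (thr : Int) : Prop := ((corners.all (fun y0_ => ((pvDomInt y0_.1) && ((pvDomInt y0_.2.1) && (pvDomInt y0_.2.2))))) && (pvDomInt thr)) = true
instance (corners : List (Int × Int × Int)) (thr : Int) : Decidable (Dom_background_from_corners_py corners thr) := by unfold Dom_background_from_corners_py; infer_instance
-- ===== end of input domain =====

-- B replaces the per-corner short-circuiting similarity loop by one aggregate pass building
-- per-channel minima/maxima of the remaining corners, then a single constant-size comparison.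


-- ===== PORT A =====
def colorsSimilar (c1 c2 : Int × Int × Int) (thr : Int) : Bool :=
  decide (|c1.1 - c2.1| ≤ thr ∧ |c1.2.1 - c2.2.1| ≤ thr ∧ |c1.2.2 - c2.2.2| ≤ thr)

-- the 'for c in corners[1:]' loop with its early 'return None'
def bfcLoop (ref : Int × Int × Int) (thr : Int) : List (Int × Int × Int) → Option (Int × Int × Int)
  | [] => some ref
  | c :: cs => if colorsSimilar ref c thr then bfcLoop ref thr cs else none

def background_from_corners_py (corners : List (Int × Int × Int)) (thr : Int) : Option (Int × Int × Int) :=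
  match corners with
  | [] => none
  | ref :: rest => bfcLoop ref thr rest

-- ===== PORT B =====
def background_from_corners_py_alt (corners : List (Int × Int × Int)) (thr : Int) : Option (Int × Int × Int) :=
  match corners with
  | [] => none
  | ref :: rest =>
    match rest with
    | [] => some ref
    | c0 :: cs =>
      -- mins/maxs of zip(*rest): Python min/max of a nonempty list = foldl from its head
      let mn1 := (cs.map (·.1)).foldl min c0.1
      let mn2 := (cs.map (·.2.1)).foldl min c0.2.1
      let mn3 := (cs.map (·.2.2)).foldl min c0.2.2
      let mx1 := (cs.map (·.1)).foldl max c0.1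
      let mx2 := (cs.map (·.2.1)).foldl max c0.2.1
      let mx3 := (cs.map (·.2.2)).foldl max c0.2.2
      if mx1 - ref.1 ≤ thr ∧ ref.1 - mn1 ≤ thr ∧
         mx2 - ref.2.1 ≤ thr ∧ ref.2.1 - mn2 ≤ thr ∧
         mx3 - ref.2.2 ≤ thr ∧ ref.2.2 - mn3 ≤ thr then some ref else none

-- ===== PRECONDITION & SPEC =====
def Spec_background_from_corners_py (corners : List (Int × Int × Int)) (thr : Int) (out : Option (Int × Int × Int)) : Prop := out = background_from_corners_py_alt corners thr
instance (corners : List (Int × Int × Int)) (thr : Int) (out : Option (Int × Int × Int)) : Decidable (Spec_background_from_corners_py corners thr out) := by unfold Spec_background_from_corners_py; infer_instance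

-- ===== CLAIM (what is proved, stated in full; the proofs are below) =====
def Claim_equal_background_from_corners_py : Prop := ∀ (corners : List (Int × Int × Int)) (thr : Int), Dom_background_from_corners_py corners thr → Spec_background_from_corners_py corners thr (background_from_corners_py corners thr)

-- ===== LEMMAS AND PROOFS =====

lemma foldl_max_le_iff (l : List Int) (a t : Int) :
    l.foldl max a ≤ t ↔ (a ≤ t ∧ ∀ x ∈ l, x ≤ t) := by
  induction l generalizing a with
  | nil => simp
  | cons y ys ih =>
    simp only [List.foldl_cons, ih, List.mem_cons]
    constructor
    · rintro ⟨h, hall⟩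
      refine ⟨le_trans (le_max_left _ _) h, ?_⟩
      rintro x (rfl | hx)
      · exact le_trans (le_max_right _ _) h
      · exact hall x hx
    · rintro ⟨ha, hall⟩
      exact ⟨max_le ha (hall y (Or.inl rfl)), fun x hx => hall x (Or.inr hx)⟩

lemma le_foldl_min_iff (l : List Int) (a t : Int) :
    t ≤ l.foldl min a ↔ (t ≤ a ∧ ∀ x ∈ l, t ≤ x) := by
  induction l generalizing a with
  | nil => simp
  | cons y ys ih =>
    simp only [List.foldl_cons, ih, List.mem_cons]
    constructor
    · rintro ⟨h, hall⟩
      refine ⟨le_trans h (min_le_left _ _), ?_⟩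
      rintro x (rfl | hx)
      · exact le_trans h (min_le_right _ _)
      · exact hall x hx
    · rintro ⟨ha, hall⟩
      exact ⟨le_min ha (hall y (Or.inl rfl)), fun x hx => hall x (Or.inr hx)⟩

lemma alt_cons_cons (ref c0 : Int × Int × Int) (cs : List (Int × Int × Int)) (thr : Int) :
    background_from_corners_py_alt (ref :: c0 :: cs) thr =
      if (cs.map (·.1)).foldl max c0.1 - ref.1 ≤ thr ∧ ref.1 - (cs.map (·.1)).foldl min c0.1 ≤ thr ∧
         (cs.map (·.2.1)).foldl max c0.2.1 - ref.2.1 ≤ thr ∧ ref.2.1 - (cs.map (·.2.1)).foldl min c0.2.1 ≤ thr ∧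
         (cs.map (·.2.2)).foldl max c0.2.2 - ref.2.2 ≤ thr ∧ ref.2.2 - (cs.map (·.2.2)).foldl min c0.2.2 ≤ thr
      then some ref else none := rfl

lemma bfcLoop_eq (ref : Int × Int × Int) (thr : Int) (l : List (Int × Int × Int)) :
    bfcLoop ref thr l =
      if ∀ c ∈ l, colorsSimilar ref c thr then some ref else none := by
  induction l with
  | nil => simp [bfcLoop]
  | cons c cs ih =>
    by_cases h : colorsSimilar ref c thr = true
    · rw [show bfcLoop ref thr (c :: cs) = bfcLoop ref thr cs from by simp [bfcLoop, h], ih]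
      exact if_congr (by simp [h]) rfl rfl
    · rw [show bfcLoop ref thr (c :: cs) = none from by simp [bfcLoop, h]]
      exact (if_neg (fun hall => h (hall c (by simp)))).symm

theorem background_from_corners_py_spec : Claim_equal_background_from_corners_py := by
  intro corners thr _
  unfold Spec_background_from_corners_py background_from_corners_py
  match corners with
  | [] => rfl
  | ref :: [] => rfl
  | ref :: c0 :: cs =>
    show bfcLoop ref thr (c0 :: cs) = _
    rw [bfcLoop_eq, alt_cons_cons]
    have key : (∀ c ∈ c0 :: cs, colorsSimilar ref c thr = true) ↔
        ((cs.map (·.1)).foldl max c0.1 - ref.1 ≤ thr ∧ ref.1 - (cs.map (·.1)).foldl min c0.1 ≤ thr ∧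
         (cs.map (·.2.1)).foldl max c0.2.1 - ref.2.1 ≤ thr ∧ ref.2.1 - (cs.map (·.2.1)).foldl min c0.2.1 ≤ thr ∧
         (cs.map (·.2.2)).foldl max c0.2.2 - ref.2.2 ≤ thr ∧ ref.2.2 - (cs.map (·.2.2)).foldl min c0.2.2 ≤ thr) := by
      have hmx1 := foldl_max_le_iff (cs.map (·.1)) c0.1 (ref.1 + thr)
      have hmn1 := le_foldl_min_iff (cs.map (·.1)) c0.1 (ref.1 - thr)
      have hmx2 := foldl_max_le_iff (cs.map (·.2.1)) c0.2.1 (ref.2.1 + thr)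
      have hmn2 := le_foldl_min_iff (cs.map (·.2.1)) c0.2.1 (ref.2.1 - thr)
      have hmx3 := foldl_max_le_iff (cs.map (·.2.2)) c0.2.2 (ref.2.2 + thr)
      have hmn3 := le_foldl_min_iff (cs.map (·.2.2)) c0.2.2 (ref.2.2 - thr)
      simp only [List.mem_map, forall_exists_index, and_imp, forall_apply_eq_imp_iff₂] at hmx1 hmn1 hmx2 hmn2 hmx3 hmn3
      simp only [colorsSimilar, decide_eq_true_eq, List.mem_cons, abs_le]
      constructor
      · intro h
        have h0 := h c0 (Or.inl rfl)
        have hs : ∀ c ∈ cs, |ref.1 - c.1| ≤ thr ∧ |ref.2.1 - c.2.1| ≤ thr ∧ |ref.2.2 - c.2.2| ≤ thr := by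
          intro c hc
          have := h c (Or.inr hc)
          simpa [abs_le] using this
        simp only [abs_le] at h0 hs
        refine ⟨?_, ?_, ?_, ?_, ?_, ?_⟩
        · have := hmx1.2 ⟨by omega, fun c hc => by have := (hs c hc).1; omega⟩; omega
        · have := hmn1.2 ⟨by omega, fun c hc => by have := (hs c hc).1; omega⟩; omega
        · have := hmx2.2 ⟨by omega, fun c hc => by have := (hs c hc).2.1; omega⟩; omega
        · have := hmn2.2 ⟨by omega, fun c hc => by have := (hs c hc).2.1; omega⟩; omega
        · have := hmx3.2 ⟨by omega, fun c hc => by have := (hs c hc).2.2; omega⟩; omega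
        · have := hmn3.2 ⟨by omega, fun c hc => by have := (hs c hc).2.2; omega⟩; omega
      · rintro ⟨a1, b1, a2, b2, a3, b3⟩ c hc
        have m1 := hmx1.1 (by omega); have n1 := hmn1.1 (by omega)
        have m2 := hmx2.1 (by omega); have n2 := hmn2.1 (by omega)
        have m3 := hmx3.1 (by omega); have n3 := hmn3.1 (by omega)
        rcases hc with rfl | hc
        · refine ⟨by omega, by omega, by omega⟩
        · have p1 := m1.2 c hc; have q1 := n1.2 c hc
          have p2 := m2.2 c hc; have q2 := n2.2 c hc
          have p3 := m3.2 c hc; have q3 := n3.2 c hc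
          refine ⟨by omega, by omega, by omega⟩
    exact if_congr key rfl rfl
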